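-- pv_equiv track=rewrite | github.com/siqment/DOLGI | lab№3.py | assign_pets
-- ===== SOURCE A (Python) =====
-- def assign_pets(lst):
--     pets_dict = {}
--     for tup in lst:
--         owner = '{0} {1}'.format(tup[2], tup[3])
--         pets = '{0}, возраст - {1}'.format(tup[0], tup[1])
--         if owner not in pets_dict:
--             pets_dict.setdefault(owner, pets)
--         else:
--             pets_dict.update({owner: pets_dict.get(owner) + '; ' + pets})
--     return pets_dict
-- ===== SOURCE B (Python) =====
-- def assign_pets(lst):
--     owners = []
--     for tup in lst:
--         owner = '{0} {1}'.format(tup[2], tup[3])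
--         if owner not in owners:
--             owners.append(owner)
--     return {
--         owner: '; '.join('{0}, возраст - {1}'.format(t[0], t[1])
--                          for t in lst
--                          if '{0} {1}'.format(t[2], t[3]) == owner)
--         for owner in owners
--     }
-- ===== Notes on version B (the rewrite author's own statement) =====
-- stated objective: alternative
-- what changed: B drops the dict accumulator: a first pass collects the distinct owner keys in first-seen order into a list, then for each owner a nested scan over the whole input gathers that owner's pet strings and joins them with '; ', instead of A's single pass growing a string per owner inside a dict.
import Mathlib
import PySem

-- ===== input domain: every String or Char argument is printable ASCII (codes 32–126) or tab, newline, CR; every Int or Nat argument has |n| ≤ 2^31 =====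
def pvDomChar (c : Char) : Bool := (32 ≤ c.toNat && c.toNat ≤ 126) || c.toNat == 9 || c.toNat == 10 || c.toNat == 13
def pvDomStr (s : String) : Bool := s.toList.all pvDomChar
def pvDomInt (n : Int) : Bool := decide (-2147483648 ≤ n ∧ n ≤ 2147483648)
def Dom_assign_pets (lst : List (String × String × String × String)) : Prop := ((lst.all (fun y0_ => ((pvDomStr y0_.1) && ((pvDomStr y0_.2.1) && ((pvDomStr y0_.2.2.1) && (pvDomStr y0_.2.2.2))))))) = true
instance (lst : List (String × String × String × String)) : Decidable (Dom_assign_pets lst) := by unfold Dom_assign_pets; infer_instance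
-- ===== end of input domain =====

-- B drops A's dict-of-growing-strings: it first collects the distinct owners in
-- first-seen order, then for each owner a nested scan over the input gathers and
-- joins that owner's pet strings with "; " (alternative decomposition, no dict).

-- ===== PORT A =====
def assign_pets (lst : List (String × String × String × String)) : List (String × String) :=
  (lst.foldl (fun d tup =>
      let owner := tup.2.2.1 ++ " " ++ tup.2.2.2
      let pets := tup.1 ++ ", возраст - " ++ tup.2.1
      if d.contains owner = false then
        d.setdefault owner pets
      else
        d.insert owner (((d.get? owner).getD "") ++ "; " ++ pets))
    PySem.Dict.empty).items

-- ===== PORT B =====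
-- '{0} {1}'.format(tup[2], tup[3])
def pvKeyB (t : String × String × String × String) : String := t.2.2.1 ++ " " ++ t.2.2.2
-- '{0}, возраст - {1}'.format(t[0], t[1])
def pvValB (t : String × String × String × String) : String := t.1 ++ ", возраст - " ++ t.2.1

def assign_pets_alt (lst : List (String × String × String × String)) : List (String × String) :=
  let owners := lst.foldl (fun acc tup =>
      let owner := pvKeyB tup
      if owner ∈ acc then acc else acc ++ [owner]) ([] : List String)
  owners.map (fun o =>
    (o, PySem.Str.join "; " ((lst.filter (fun t => pvKeyB t == o)).map pvValB)))

-- ===== PRECONDITION & SPEC =====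
def Spec_assign_pets (lst : List (String × String × String × String)) (out : List (String × String)) : Prop := out = assign_pets_alt lst
instance (lst : List (String × String × String × String)) (out : List (String × String)) : Decidable (Spec_assign_pets lst out) := by unfold Spec_assign_pets; infer_instance

-- ===== CLAIM (what is proved, stated in full; the proofs are below) =====
def Claim_equal_assign_pets : Prop := ∀ (lst : List (String × String × String × String)), Dom_assign_pets lst → Spec_assign_pets lst (assign_pets lst)

-- ===== LEMMAS AND PROOFS =====

-- proof helper: the grouping dict "owner ↦ list of that owner's pet strings"
def pvG (lst : List (String × String × String × String)) : PySem.Dict String (List String) :=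
  lst.foldl (fun d tup => d.modify (pvKeyB tup) [] (fun ps => ps ++ [pvValB tup]))
    PySem.Dict.empty

-- "; ".join([x]) = x
lemma join_one (sep x : String) : PySem.Str.join sep [x] = x := by
  apply String.toList_inj.mp
  simp [PySem.Str.toList_join, PySem.Chars.join_singleton]

-- "; ".join(v + [x]) = "; ".join(v) + "; " + x  for nonempty v
lemma join_snoc (sep x : String) (v : List String) (h : v ≠ []) :
    PySem.Str.join sep (v ++ [x]) = PySem.Str.join sep v ++ sep ++ x := by
  apply String.toList_inj.mp
  simp only [PySem.Str.toList_join, List.map_append, List.map_cons, List.map_nil,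
    String.toList_append]
  induction v with
  | nil => exact absurd rfl h
  | cons a t ih =>
    cases t with
    | nil => simp [PySem.Chars.join_singleton, PySem.Chars.join_cons_cons]
    | cons b r =>
      have := ih (by simp)
      simp only [List.map_cons, List.cons_append, PySem.Chars.join_cons_cons] at this ⊢
      simp [this]

-- the invariant: A's dict is the grouping dict with every value list joined by "; "
lemma loop_inv (l : List (String × String × String × String))
    (dA : PySem.Dict String String) (dB : PySem.Dict String (List String))
    (h : dA.items = dB.items.map (fun p => (p.1, PySem.Str.join "; " p.2)))
    (hne : ∀ p ∈ dB.items, p.2 ≠ [])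
    (hnd : dB.keys.Nodup) :
    (l.foldl (fun d tup =>
        let owner := tup.2.2.1 ++ " " ++ tup.2.2.2
        let pets := tup.1 ++ ", возраст - " ++ tup.2.1
        if d.contains owner = false then
          d.setdefault owner pets
        else
          d.insert owner (((d.get? owner).getD "") ++ "; " ++ pets)) dA).items
    = ((l.foldl (fun d tup =>
        d.modify (pvKeyB tup) [] (fun ps => ps ++ [pvValB tup])) dB).items).map
        (fun p => (p.1, PySem.Str.join "; " p.2)) := by
  induction l generalizing dA dB with
  | nil => simpa using h
  | cons t l ih =>
    simp only [List.foldl_cons]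
    set k : String := t.2.2.1 ++ " " ++ t.2.2.2 with hk
    set x : String := t.1 ++ ", возраст - " ++ t.2.1 with hx
    have hkeys : dA.keys = dB.keys := by
      simp only [PySem.Dict.keys, h, List.map_map]; rfl
    have hcont : dA.contains k = dB.contains k := by
      rw [PySem.Dict.contains_eq_decide_mem_keys, PySem.Dict.contains_eq_decide_mem_keys, hkeys]
    by_cases hc : dB.contains k = true
    · -- key present: both sides overwrite
      have hcA : dA.contains k = true := by rw [hcont]; exact hc
      obtain ⟨v, hv⟩ : ∃ v, dB.get? k = some v := by
        have := PySem.Dict.contains_eq_isSome_get? dB k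
        rw [hc] at this
        exact Option.isSome_iff_exists.mp this.symm
      have hvmem : (k, v) ∈ dB.items := PySem.Dict.mem_items_of_get?_eq_some dB hv
      have hvne : v ≠ [] := hne _ hvmem
      have hAget : dA.get? k = some (PySem.Str.join "; " v) := by
        apply PySem.Dict.get?_of_mem_items
        · rw [h]
          exact List.mem_map.mpr ⟨(k, v), hvmem, rfl⟩
        · rw [hkeys]; exact hnd
      have hstep :
          (if dA.contains k = false then dA.setdefault k x
           else dA.insert k (((dA.get? k).getD "") ++ "; " ++ x)).items
          = ((dB.modify (pvKeyB t) [] (fun ps => ps ++ [pvValB t])).items).map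
              (fun p => (p.1, PySem.Str.join "; " p.2)) := by
        rw [hcA]
        simp only [Bool.true_eq_false, if_false, hAget, Option.getD_some]
        rw [show pvKeyB t = k from rfl, show pvValB t = x from rfl]
        rw [PySem.Dict.modify, PySem.Dict.getD_of_get?_eq_some dB [] hv]
        rw [PySem.Dict.items_insert_of_contains dA _ hcA,
            PySem.Dict.items_insert_of_contains dB _ hc, h, List.map_map, List.map_map]
        apply List.map_congr_left
        intro p hp
        by_cases hpk : p.1 = k
        · have hpv : dB.get? p.1 = some p.2 := PySem.Dict.get?_of_mem_items dB hp hnd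
          rw [hpk, hv] at hpv
          simp [Function.comp, hpk, join_snoc "; " x v hvne]
        · simp [Function.comp, hpk]
      refine ih _ _ hstep ?_ ?_
      · intro p hp
        rw [show pvKeyB t = k from rfl, show pvValB t = x from rfl] at hp
        rw [PySem.Dict.modify, PySem.Dict.items_insert_of_contains dB _ hc] at hp
        obtain ⟨q, hq, hqe⟩ := List.mem_map.mp hp
        by_cases hqk : q.1 = k
        · simp only [hqk, BEq.rfl, if_true] at hqe
          rw [← hqe]; simp
        · have hb : (q.1 == k) = false := beq_eq_false_iff_ne.mpr hqk
          rw [hb] at hqe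
          simp only [Bool.false_eq_true, if_false] at hqe
          rw [← hqe]; exact hne q hq
      · rw [show pvKeyB t = k from rfl]
        rw [PySem.Dict.modify, PySem.Dict.keys_insert_of_contains dB _ hc]; exact hnd
    · -- fresh key: both sides append
      have hc' : dB.contains k = false := by revert hc; cases dB.contains k <;> simp
      have hcA : dA.contains k = false := by rw [hcont]; exact hc'
      have hstep :
          (if dA.contains k = false then dA.setdefault k x
           else dA.insert k (((dA.get? k).getD "") ++ "; " ++ x)).items
          = ((dB.modify (pvKeyB t) [] (fun ps => ps ++ [pvValB t])).items).map
              (fun p => (p.1, PySem.Str.join "; " p.2)) := by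
        rw [hcA]
        simp only [if_true]
        rw [show pvKeyB t = k from rfl, show pvValB t = x from rfl]
        rw [PySem.Dict.setdefault_of_not_contains dA x hcA,
            PySem.Dict.modify, PySem.Dict.getD_of_not_contains dB [] hc',
            PySem.Dict.items_insert_of_not_contains dA x hcA,
            PySem.Dict.items_insert_of_not_contains dB _ hc']
        simp [h, join_one]
      refine ih _ _ hstep ?_ ?_
      · intro p hp
        rw [show pvKeyB t = k from rfl, show pvValB t = x from rfl] at hp
        rw [PySem.Dict.modify, PySem.Dict.items_insert_of_not_contains dB _ hc'] at hp
        rcases List.mem_append.mp hp with h1 | h2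
        · exact hne p h1
        · simp only [List.mem_singleton] at h2
          rw [h2]; simp
      · rw [show pvKeyB t = k from rfl]
        exact PySem.Dict.nodup_keys_insert dB k _ hnd

-- A's result is the grouping dict with every list joined
lemma A_eq_map_G (lst : List (String × String × String × String)) :
    assign_pets lst = (pvG lst).items.map (fun p => (p.1, PySem.Str.join "; " p.2)) := by
  unfold assign_pets pvG
  exact loop_inv lst PySem.Dict.empty PySem.Dict.empty (by rfl)
    (by simp [PySem.Dict.empty]) (by simp [PySem.Dict.empty, PySem.Dict.keys])

-- pvG as a fold over (key, value) pairs
lemma pvG_eq_pairs (lst : List (String × String × String × String)) :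
    pvG lst = (lst.map (fun t => (pvKeyB t, pvValB t))).foldl
      (fun d p => d.modify p.1 [] (fun ps => ps ++ [p.2])) PySem.Dict.empty := by
  unfold pvG
  rw [List.foldl_map]

lemma G_keys (lst : List (String × String × String × String)) :
    (pvG lst).keys = PySem.Set.ofList (lst.map pvKeyB) := by
  rw [pvG_eq_pairs,
    PySem.Dict.keys_foldl_modify_key (key := Prod.fst)
      (f := fun _ p => fun ps => ps ++ [p.2])]
  rw [PySem.Dict.keys_empty, PySem.Set.update_nil_left, List.map_map]
  rfl

lemma G_nodup (lst : List (String × String × String × String)) :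
    (pvG lst).keys.Nodup := by
  rw [G_keys]; exact PySem.Set.nodup_ofList _

lemma G_getD (lst : List (String × String × String × String)) (o : String) :
    (pvG lst).getD o [] = (lst.filter (fun t => pvKeyB t == o)).map pvValB := by
  rw [pvG_eq_pairs, PySem.Dict.getD_foldl_modify_append, PySem.Dict.getD_empty,
    List.nil_append, List.filter_map, List.map_map]
  rfl

-- the items of the grouping dict, spelled out
lemma G_items (lst : List (String × String × String × String)) :
    (pvG lst).items = (PySem.Set.ofList (lst.map pvKeyB)).map
      (fun o => (o, (lst.filter (fun t => pvKeyB t == o)).map pvValB)) := by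
  rw [PySem.Dict.items_eq_map_keys (pvG lst) (G_nodup lst) ([] : List String), G_keys]
  apply List.map_congr_left
  intro o _
  rw [G_getD]

-- B's first loop collects exactly the distinct owners in order
lemma owners_eq (lst : List (String × String × String × String)) :
    lst.foldl (fun acc tup =>
        let owner := pvKeyB tup
        if owner ∈ acc then acc else acc ++ [owner]) ([] : List String)
    = PySem.Set.ofList (lst.map pvKeyB) := by
  rw [← PySem.Set.update_nil_left, PySem.Set.update_map_eq_foldl_add]
  apply PySem.List.foldl_congr_mem
  intro acc t _
  simp [PySem.Set.add_eq_ite]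

-- ===== VERDICT (by name: the statement is the Claim_ definition above) =====
theorem assign_pets_spec : Claim_equal_assign_pets := by
  intro lst _
  unfold Spec_assign_pets assign_pets_alt
  rw [A_eq_map_G, G_items, owners_eq, List.map_map]
  rfl
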